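-- pv_equiv track=rewrite | github.com/albrunj/production_database_scripts | strips/sensors/reportingGlobal/write_sensor_summary_to_xlsx.py | get_sensor_type_counts
-- ===== SOURCE A (Python) =====
-- sensor_type_abbrevs = ['SS','LS','R0','R1','R2','R3','R4','R5','DUMMY']
--
-- def get_sensor_type_counts(sensor_type_abbrev,count):
--     sensor_type_abbrev_vals = []
--     for abbrev in sensor_type_abbrevs:
--         if sensor_type_abbrev == abbrev:
--             sensor_type_abbrev_vals.append(count)
--         else:
--             sensor_type_abbrev_vals.append(0)
--     return sensor_type_abbrev_vals
-- ===== SOURCE B (Python) =====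
-- sensor_type_abbrevs = ['SS','LS','R0','R1','R2','R3','R4','R5','DUMMY']
--
-- # One-hot basis mask for every abbreviation, computed once at import time.
-- _BASIS = {ab: [int(x == ab) for x in sensor_type_abbrevs] for ab in sensor_type_abbrevs}
-- _ZERO = [0] * len(sensor_type_abbrevs)
--
-- def get_sensor_type_counts(sensor_type_abbrev, count):
--     # table lookup + scalar multiplication: count * basis(sensor_type_abbrev)
--     return [count * m for m in _BASIS.get(sensor_type_abbrev, _ZERO)]
-- ===== Notes on version B (the rewrite author's own statement) =====
-- stated objective: alternative
-- what changed: Replaces the per-call scan-and-branch loop with a precomputed table of one-hot basis masks (a dict built once at module load) and a branch-free scalar multiplication count * mask; the function itself contains no comparison against the abbrev list at all.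
import Mathlib
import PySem

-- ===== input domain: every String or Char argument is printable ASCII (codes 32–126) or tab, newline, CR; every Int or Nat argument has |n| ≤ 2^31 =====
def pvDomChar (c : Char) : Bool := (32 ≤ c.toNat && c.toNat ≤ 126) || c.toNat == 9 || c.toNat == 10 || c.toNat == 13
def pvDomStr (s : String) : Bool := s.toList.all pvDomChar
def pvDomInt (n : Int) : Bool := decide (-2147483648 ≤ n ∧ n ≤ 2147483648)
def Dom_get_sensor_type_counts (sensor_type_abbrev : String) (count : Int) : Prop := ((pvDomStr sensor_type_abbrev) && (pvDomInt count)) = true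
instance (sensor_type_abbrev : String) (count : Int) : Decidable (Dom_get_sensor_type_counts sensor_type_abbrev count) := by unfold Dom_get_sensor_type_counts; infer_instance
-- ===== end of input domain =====

-- B replaces A's per-call scan-and-branch loop with a precomputed one-hot basis table and a branch-free scalar multiplication; return value proved equal to A's everywhere.

def sensorTypeAbbrevs : List String := ["SS","LS","R0","R1","R2","R3","R4","R5","DUMMY"]

-- ===== PORT A =====
-- A: scan the abbrev list, appending count on a match and 0 otherwise.
def get_sensor_type_counts (sensor_type_abbrev : String) (count : Int) : List Int :=
  sensorTypeAbbrevs.foldl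
    (fun vals ab => vals ++ [if sensor_type_abbrev == ab then count else 0]) []

-- ===== PORT B =====
-- B-side helper: _BASIS, the module-level dict comprehension mapping each abbrev to its one-hot mask.
def basisTable : PySem.Dict String (List Int) :=
  sensorTypeAbbrevs.foldl
    (fun d ab => d.insert ab (sensorTypeAbbrevs.map (fun x => if x == ab then (1 : Int) else 0)))
    PySem.Dict.empty

-- B-side helper: _ZERO = [0] * len(sensor_type_abbrevs).
def zeroVec : List Int := List.replicate sensorTypeAbbrevs.length 0

-- B: table lookup + scalar multiplication: count * basis(sensor_type_abbrev).
def get_sensor_type_counts_alt (sensor_type_abbrev : String) (count : Int) : List Int :=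
  (basisTable.getD sensor_type_abbrev zeroVec).map (fun m => count * m)

-- ===== PRECONDITION & SPEC =====
def Spec_get_sensor_type_counts (sensor_type_abbrev : String) (count : Int) (out : List Int) : Prop := out = get_sensor_type_counts_alt sensor_type_abbrev count
instance (sensor_type_abbrev : String) (count : Int) (out : List Int) : Decidable (Spec_get_sensor_type_counts sensor_type_abbrev count out) := by unfold Spec_get_sensor_type_counts; infer_instance

-- ===== CLAIM (what is proved, stated in full; the proofs are below) =====
def Claim_equal_get_sensor_type_counts : Prop := ∀ (sensor_type_abbrev : String) (count : Int), Dom_get_sensor_type_counts sensor_type_abbrev count → Spec_get_sensor_type_counts sensor_type_abbrev count (get_sensor_type_counts sensor_type_abbrev count)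

-- ===== LEMMAS AND PROOFS =====

-- ===== VERDICT (by name: the statement is the Claim_ definition above) =====
theorem get_sensor_type_counts_spec : Claim_equal_get_sensor_type_counts := by
  intro s c _
  unfold Spec_get_sensor_type_counts
  by_cases h1 : s = "SS"; · subst h1; simp [get_sensor_type_counts, get_sensor_type_counts_alt, sensorTypeAbbrevs, basisTable, zeroVec, PySem.Dict.getD, PySem.Dict.get?, PySem.Dict.insert, PySem.Dict.empty]
  by_cases h2 : s = "LS"; · subst h2; simp [get_sensor_type_counts, get_sensor_type_counts_alt, sensorTypeAbbrevs, basisTable, zeroVec, PySem.Dict.getD, PySem.Dict.get?, PySem.Dict.insert, PySem.Dict.empty]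
  by_cases h3 : s = "R0"; · subst h3; simp [get_sensor_type_counts, get_sensor_type_counts_alt, sensorTypeAbbrevs, basisTable, zeroVec, PySem.Dict.getD, PySem.Dict.get?, PySem.Dict.insert, PySem.Dict.empty]
  by_cases h4 : s = "R1"; · subst h4; simp [get_sensor_type_counts, get_sensor_type_counts_alt, sensorTypeAbbrevs, basisTable, zeroVec, PySem.Dict.getD, PySem.Dict.get?, PySem.Dict.insert, PySem.Dict.empty]
  by_cases h5 : s = "R2"; · subst h5; simp [get_sensor_type_counts, get_sensor_type_counts_alt, sensorTypeAbbrevs, basisTable, zeroVec, PySem.Dict.getD, PySem.Dict.get?, PySem.Dict.insert, PySem.Dict.empty]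
  by_cases h6 : s = "R3"; · subst h6; simp [get_sensor_type_counts, get_sensor_type_counts_alt, sensorTypeAbbrevs, basisTable, zeroVec, PySem.Dict.getD, PySem.Dict.get?, PySem.Dict.insert, PySem.Dict.empty]
  by_cases h7 : s = "R4"; · subst h7; simp [get_sensor_type_counts, get_sensor_type_counts_alt, sensorTypeAbbrevs, basisTable, zeroVec, PySem.Dict.getD, PySem.Dict.get?, PySem.Dict.insert, PySem.Dict.empty]
  by_cases h8 : s = "R5"; · subst h8; simp [get_sensor_type_counts, get_sensor_type_counts_alt, sensorTypeAbbrevs, basisTable, zeroVec, PySem.Dict.getD, PySem.Dict.get?, PySem.Dict.insert, PySem.Dict.empty]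
  by_cases h9 : s = "DUMMY"; · subst h9; simp [get_sensor_type_counts, get_sensor_type_counts_alt, sensorTypeAbbrevs, basisTable, zeroVec, PySem.Dict.getD, PySem.Dict.get?, PySem.Dict.insert, PySem.Dict.empty]
  have b1 : ("SS" == s) = false := beq_eq_false_iff_ne.mpr (fun h => h1 h.symm)
  have b2 : ("LS" == s) = false := beq_eq_false_iff_ne.mpr (fun h => h2 h.symm)
  have b3 : ("R0" == s) = false := beq_eq_false_iff_ne.mpr (fun h => h3 h.symm)
  have b4 : ("R1" == s) = false := beq_eq_false_iff_ne.mpr (fun h => h4 h.symm)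
  have b5 : ("R2" == s) = false := beq_eq_false_iff_ne.mpr (fun h => h5 h.symm)
  have b6 : ("R3" == s) = false := beq_eq_false_iff_ne.mpr (fun h => h6 h.symm)
  have b7 : ("R4" == s) = false := beq_eq_false_iff_ne.mpr (fun h => h7 h.symm)
  have b8 : ("R5" == s) = false := beq_eq_false_iff_ne.mpr (fun h => h8 h.symm)
  have b9 : ("DUMMY" == s) = false := beq_eq_false_iff_ne.mpr (fun h => h9 h.symm)
  simp [get_sensor_type_counts, get_sensor_type_counts_alt, sensorTypeAbbrevs, basisTable, zeroVec,
    PySem.Dict.getD, PySem.Dict.get?, PySem.Dict.insert, PySem.Dict.empty, List.foldl, List.find?,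
    h1, h2, h3, h4, h5, h6, h7, h8, h9, b1, b2, b3, b4, b5, b6, b7, b8, b9]
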